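-- pv_equiv track=rewrite | github.com/mousomer/tet4d | tetris_nd/score_analyzer.py | _iter_columns
-- ===== SOURCE A (Python) =====
-- from itertools import product
--
-- def _lateral_axes(dims: tuple[int, ...], gravity_axis: int) -> tuple[int, ...]:
--     return tuple(axis for axis in range(len(dims)) if axis != gravity_axis)
--
-- def _iter_columns(dims: tuple[int, ...], gravity_axis: int):
--     axes = _lateral_axes(dims, gravity_axis)
--     ranges = [range(max(1, dims[axis])) for axis in axes]
--     if not ranges:
--         yield tuple()
--         return
--     for values in product(*ranges):
--         yield tuple(values)
-- ===== SOURCE B (Python) =====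
-- def _iter_columns(dims: tuple[int, ...], gravity_axis: int):
--     # Rank decoding: compute the total number of columns, then convert each
--     # rank 0..total-1 into its mixed-radix digit vector with divmod
--     # (least-significant digit = last lateral axis), instead of enumerating
--     # the Cartesian product with nested iteration.
--     sizes = [max(1, d) for axis, d in enumerate(dims) if axis != gravity_axis]
--     total = 1
--     for s in sizes:
--         total *= s
--     for rank in range(total):
--         r = rank
--         digits = []
--         for s in reversed(sizes):
--             r, d = divmod(r, s)
--             digits.append(d)
--         digits.reverse()
--         yield tuple(digits)
-- ===== Notes on version B (the rewrite author's own statement) =====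
-- stated objective: alternative
-- what changed: Replaces the Cartesian-product enumeration (itertools.product over per-axis ranges) with rank decoding: the total count is computed once and each rank in range(total) is converted to its mixed-radix digit tuple by repeated divmod over the reversed size list.
import Mathlib
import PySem

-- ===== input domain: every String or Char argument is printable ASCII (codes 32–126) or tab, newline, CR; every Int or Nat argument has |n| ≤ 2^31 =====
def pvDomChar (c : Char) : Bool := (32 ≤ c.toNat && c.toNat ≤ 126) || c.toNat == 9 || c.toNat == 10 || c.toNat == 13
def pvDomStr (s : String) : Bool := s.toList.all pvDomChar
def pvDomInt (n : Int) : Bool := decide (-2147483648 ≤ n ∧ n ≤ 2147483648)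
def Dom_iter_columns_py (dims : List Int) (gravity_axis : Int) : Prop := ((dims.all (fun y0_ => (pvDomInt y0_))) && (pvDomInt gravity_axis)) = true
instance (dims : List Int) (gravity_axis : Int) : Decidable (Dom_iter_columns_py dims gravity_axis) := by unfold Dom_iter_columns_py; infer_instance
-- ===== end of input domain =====

-- B replaces the Cartesian-product enumeration by rank decoding: the total count is
-- computed once and each rank in range(total) is converted to its mixed-radix digit
-- tuple by repeated divmod over the reversed size list; same order, same output.

-- ===== PORT A =====
-- itertools.product(*ranges) in lexicographic order, last range fastest
def pvProdL : List (List Int) → List (List Int)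
  | [] => [[]]
  | r :: rs => r.flatMap (fun v => (pvProdL rs).map (fun t => v :: t))

def iter_columns_py (dims : List Int) (gravity_axis : Int) : List (List Int) :=
  let axes := (PySem.List.pyRange 0 (dims.length : Int) 1).filter (fun a => a != gravity_axis)
  let ranges := axes.map (fun a => PySem.List.pyRange 0 (max 1 (PySem.List.pyGetD dims a 0)) 1)
  if ranges.isEmpty then [[]] else pvProdL ranges

-- ===== PORT B =====
-- one divmod step of Source B's inner loop: state = (r, digits); digits is appended to
def pvDecAux (st : Int × List Int) (s : Int) : Int × List Int :=
  (PySem.Int.floordiv st.1 s, st.2 ++ [PySem.Int.mod st.1 s])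

def iter_columns_py_alt (dims : List Int) (gravity_axis : Int) : List (List Int) :=
  let sizes := ((PySem.List.enumerate dims 0).filter (fun p => p.1 != gravity_axis)).map
      (fun p => max 1 p.2)
  let total := sizes.foldl (· * ·) 1
  (PySem.List.pyRange 0 total 1).map
    (fun rank => ((sizes.reverse.foldl pvDecAux (rank, [])).2).reverse)

-- ===== PRECONDITION & SPEC =====
def Spec_iter_columns_py (dims : List Int) (gravity_axis : Int) (out : List (List Int)) : Prop := out = iter_columns_py_alt dims gravity_axis
instance (dims : List Int) (gravity_axis : Int) (out : List (List Int)) : Decidable (Spec_iter_columns_py dims gravity_axis out) := by unfold Spec_iter_columns_py; infer_instance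

-- ===== CLAIM (what is proved, stated in full; the proofs are below) =====
def Claim_equal_iter_columns_py : Prop := ∀ (dims : List Int) (gravity_axis : Int), Dom_iter_columns_py dims gravity_axis → Spec_iter_columns_py dims gravity_axis (iter_columns_py dims gravity_axis)

-- ===== LEMMAS AND PROOFS =====

-- full mixed-radix product of a size vector
def pvProdS : List Int → List (List Int)
  | [] => [[]]
  | s :: ss => (PySem.List.pyRange 0 s 1).flatMap (fun v => (pvProdS ss).map (fun t => v :: t))

-- recursive (rightmost digit first) form of Source B's inner loop
def pvDec : List Int → Int → Int × List Int
  | [], r => (r, [])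
  | s :: ss, r =>
    (PySem.Int.floordiv (pvDec ss r).1 s, PySem.Int.mod (pvDec ss r).1 s :: (pvDec ss r).2)

theorem pvProdL_map (ss : List Int) :
    pvProdL (ss.map (fun s => PySem.List.pyRange 0 s 1)) = pvProdS ss := by
  induction ss with
  | nil => rfl
  | cons s ss ih => simp [pvProdL, pvProdS, ih]

-- A's result is the full product of the (common) size vector
theorem pvA_eq_prodS (dims : List Int) (g : Int) :
    iter_columns_py dims g =
      pvProdS (((PySem.List.pyRange 0 (dims.length : Int) 1).filter (fun a => a != g)).map
        (fun a => max 1 (PySem.List.pyGetD dims a 0))) := by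
  cases hax : (PySem.List.pyRange 0 (dims.length : Int) 1).filter (fun a => a != g) with
  | nil => simp [iter_columns_py, hax, pvProdS]
  | cons a as =>
    simp only [iter_columns_py, hax, List.map_cons, List.isEmpty_cons, if_neg Bool.false_ne_true]
    rw [← pvProdL_map]
    simp [List.map_map, Function.comp_def]

-- B's size vector equals A's
theorem pvSizes_eq (dims : List Int) (g : Int) :
    ((PySem.List.enumerate dims 0).filter (fun p => p.1 != g)).map (fun p => max 1 p.2) =
    ((PySem.List.pyRange 0 (dims.length : Int) 1).filter (fun a => a != g)).map
      (fun a => max 1 (PySem.List.pyGetD dims a 0)) := by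
  rw [PySem.List.enumerate_eq_map_pyRange (d := 0), List.filter_map, List.map_map]
  rfl

-- Source B's reversed-fold equals the recursive pvDec (digits accumulated in reverse)
theorem pvFold_eq_dec (ss : List Int) : ∀ (r : Int) (acc : List Int),
    ss.reverse.foldl pvDecAux (r, acc) = ((pvDec ss r).1, acc ++ (pvDec ss r).2.reverse) := by
  induction ss with
  | nil => intro r acc; simp [pvDec]
  | cons s ss ih =>
    intro r acc
    simp only [List.reverse_cons, List.foldl_append, ih, List.foldl_cons, List.foldl_nil,
      pvDecAux, pvDec]
    simp

theorem pvDivmod_unique {s v u : Int} (hs : 0 < s) (h0 : 0 ≤ u) (hu : u < s) :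
    PySem.Int.floordiv (v * s + u) s = v ∧ PySem.Int.mod (v * s + u) s = u := by
  have hfd : PySem.Int.floordiv (v * s + u) s = v := by
    rw [PySem.Int.floordiv_eq_iff_of_pos hs]
    constructor
    · nlinarith
    · nlinarith
  refine ⟨hfd, ?_⟩
  have h := PySem.Int.floordiv_mul_add_mod (v * s + u) s
  rw [hfd] at h
  linarith

theorem pvProd_pos {ss : List Int} (h : ∀ s ∈ ss, 1 ≤ s) : 1 ≤ ss.prod := by
  induction ss with
  | nil => simp
  | cons s ss ih =>
    have hs := h s (by simp)
    have ht := ih (fun t ht => h t (by simp [ht]))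
    simp only [List.prod_cons]
    nlinarith

theorem pvFoldl_mul (ss : List Int) : ∀ init : Int, ss.foldl (· * ·) init = init * ss.prod := by
  induction ss with
  | nil => intro init; simp
  | cons s ss ih => intro init; simp [ih, mul_assoc]

-- decoding rank v * prod + a (0 ≤ a < prod) yields carry v and the digits of a
theorem pvDec_spec {ss : List Int} (h : ∀ s ∈ ss, 1 ≤ s) :
    ∀ (v a : Int), 0 ≤ a → a < ss.prod → pvDec ss (v * ss.prod + a) = (v, (pvDec ss a).2) := by
  induction ss with
  | nil =>
    intro v a h0 h1
    simp only [List.prod_nil] at h0 h1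
    have : a = 0 := by omega
    subst this
    simp [pvDec]
  | cons s tt ih =>
    intro v a h0 h1
    have hs : (1 : Int) ≤ s := h s (by simp)
    have htt : ∀ t ∈ tt, (1 : Int) ≤ t := fun t ht => h t (by simp [ht])
    have hPt : (1 : Int) ≤ tt.prod := pvProd_pos htt
    simp only [List.prod_cons] at h1
    obtain ⟨u, b, hab, hb0, hb1, hu0, hu1⟩ :
        ∃ u b, u * tt.prod + b = a ∧ 0 ≤ b ∧ b < tt.prod ∧ 0 ≤ u ∧ u < s := by
      refine ⟨PySem.Int.floordiv a tt.prod, PySem.Int.mod a tt.prod,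
        PySem.Int.floordiv_mul_add_mod a tt.prod, ?_, ?_, ?_, ?_⟩
      · rw [PySem.Int.mod_eq_emod_of_pos (by omega)]
        exact Int.emod_nonneg a (by omega)
      · rw [PySem.Int.mod_eq_emod_of_pos (by omega)]
        exact Int.emod_lt_of_pos a (by omega)
      · rw [PySem.Int.le_floordiv_iff_mul_le (by omega : (0:Int) < tt.prod)]
        linarith
      · rw [PySem.Int.floordiv_lt_iff_lt_mul (by omega : (0:Int) < tt.prod)]
        nlinarith
    have hr : v * (s * tt.prod) + a = (v * s + u) * tt.prod + b := by rw [← hab]; ring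
    have htl1 : pvDec tt (v * (s * tt.prod) + a) = (v * s + u, (pvDec tt b).2) := by
      rw [hr]; exact ih htt (v * s + u) b hb0 hb1
    have htl2 : pvDec tt a = (u, (pvDec tt b).2) := by
      rw [← hab]; exact ih htt u b hb0 hb1
    have hd1 := pvDivmod_unique (v := v) (u := u) (by omega : (0:Int) < s) hu0 hu1
    have hd2 := pvDivmod_unique (v := 0) (u := u) (by omega : (0:Int) < s) hu0 hu1
    simp only [zero_mul, zero_add] at hd2
    simp [pvDec, htl1, htl2, hd1.1, hd1.2, hd2.2]

theorem pvFlatMap_congr {α β : Type} (l : List α) (f g : α → List β)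
    (h : ∀ x ∈ l, f x = g x) : l.flatMap f = l.flatMap g := by
  induction l with
  | nil => rfl
  | cons x xs ih =>
    simp only [List.flatMap_cons, h x (by simp), ih (fun y hy => h y (by simp [hy]))]

-- range(0, s*P) split into s blocks of length P
theorem pvRange_split (s Pt : Int) (hs : 0 ≤ s) (hPt : 0 ≤ Pt) :
    PySem.List.pyRange 0 (s * Pt) 1 =
      (PySem.List.pyRange 0 s 1).flatMap
        (fun v => (PySem.List.pyRange 0 Pt 1).map (fun a => v * Pt + a)) := by
  obtain ⟨n, rfl⟩ := Int.eq_ofNat_of_zero_le hs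
  induction n with
  | zero => simp
  | succ n ih =>
    have h1 : ((n : Int)) * Pt ≤ ((n + 1 : Nat) : Int) * Pt := by push_cast; nlinarith
    have h0 : (0 : Int) ≤ (n : Int) * Pt := by positivity
    rw [PySem.List.pyRange_one_append 0 ((n : Int) * Pt) (((n + 1 : Nat) : Int) * Pt) h0 h1]
    rw [ih (by positivity)]
    have hsucc : ((n + 1 : Nat) : Int) = (n : Int) + 1 := by push_cast; ring
    rw [hsucc, PySem.List.pyRange_one_succ_right (by positivity)]
    simp only [List.flatMap_append, List.flatMap_cons, List.flatMap_nil, List.append_nil]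
    congr 1
    have : ((n : Int) + 1) * Pt = (n : Int) * Pt + Pt := by ring
    rw [this]
    rw [PySem.List.pyRange_one (((n : Int)) * Pt) ((n : Int) * Pt + Pt),
        PySem.List.pyRange_one 0 Pt]
    simp [List.map_map, Function.comp_def]

-- the whole product, in order, is the decoding of range(0, prod)
theorem pvProdS_eq_decode (ss : List Int) (h : ∀ s ∈ ss, 1 ≤ s) :
    pvProdS ss = (PySem.List.pyRange 0 ss.prod 1).map (fun r => (pvDec ss r).2) := by
  induction ss with
  | nil => simp [pvProdS, pvDec, PySem.List.pyRange_one_cons (by omega : (0:Int) < 1),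
      PySem.List.pyRange_one_eq_nil (by omega : (1:Int) ≤ 1)]
  | cons s tt ih =>
    have hs : (1 : Int) ≤ s := h s (by simp)
    have htt : ∀ t ∈ tt, (1 : Int) ≤ t := fun t ht => h t (by simp [ht])
    have hPt : (1 : Int) ≤ tt.prod := pvProd_pos htt
    simp only [List.prod_cons]
    rw [pvRange_split s tt.prod (by omega) (by omega), List.map_flatMap]
    simp only [pvProdS, ih htt]
    apply pvFlatMap_congr
    intro v hv
    rw [PySem.List.mem_pyRange_one] at hv
    rw [List.map_map, List.map_map]
    apply List.map_congr_left
    intro a ha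
    rw [PySem.List.mem_pyRange_one] at ha
    have htl : pvDec tt (v * tt.prod + a) = (v, (pvDec tt a).2) :=
      pvDec_spec htt v a ha.1 ha.2
    have hd := pvDivmod_unique (s := s) (v := 0) (u := v) (by omega) hv.1 hv.2
    simp only [zero_mul, zero_add] at hd
    simp [pvDec, htl, hd.2]

-- ===== VERDICT (by name: the statement is the Claim_ definition above) =====
theorem iter_columns_py_spec : Claim_equal_iter_columns_py := by
  intro dims g _dom
  show iter_columns_py dims g = iter_columns_py_alt dims g
  unfold iter_columns_py_alt
  rw [pvSizes_eq, pvA_eq_prodS]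
  set sizes := ((PySem.List.pyRange 0 (dims.length : Int) 1).filter (fun a => a != g)).map
      (fun a => max 1 (PySem.List.pyGetD dims a 0)) with hsz
  have hpos : ∀ s ∈ sizes, 1 ≤ s := by
    intro s hs
    rw [hsz] at hs
    obtain ⟨a, _, rfl⟩ := List.mem_map.mp hs
    exact le_max_left 1 _
  show pvProdS sizes = (PySem.List.pyRange 0 (sizes.foldl (· * ·) 1) 1).map
      (fun rank => ((sizes.reverse.foldl pvDecAux (rank, [])).2).reverse)
  rw [pvFoldl_mul, one_mul, pvProdS_eq_decode sizes hpos]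
  apply List.map_congr_left
  intro r _
  rw [pvFold_eq_dec]
  simp
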